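-- pv_equiv track=rewrite | github.com/PhilipNelson5/class-projects | CS6030_HighPerformanceComputing/Homework/1_book_questions/main.py | striped
-- ===== SOURCE A (Python) =====
-- def striped(n, p):
--   indices = [[] for _ in range(p)]
--   total_work = [0 for _ in range(p)]
--
--   proc = 0
--   for i in range(n):
--     indices[proc].append(i)
--     total_work[proc] += i + 1
--     proc = (proc + 1) % p
--
--   return indices, total_work
-- ===== SOURCE B (Python) =====
-- def striped(n, p):
--   indices = [list(range(j, n, p)) for j in range(p)]
--   total_work = [sum(i + 1 for i in chunk) for chunk in indices]
--   return indices, total_work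
-- ===== Notes on version B (the rewrite author's own statement) =====
-- stated objective: simpler
-- what changed: Replaces A's single interleaved pass with a rotating modulo processor counter and in-place bucket mutation by a direct per-processor construction: bucket j is the stride slice range(j, n, p) and its work is summed from that slice.
import Mathlib
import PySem

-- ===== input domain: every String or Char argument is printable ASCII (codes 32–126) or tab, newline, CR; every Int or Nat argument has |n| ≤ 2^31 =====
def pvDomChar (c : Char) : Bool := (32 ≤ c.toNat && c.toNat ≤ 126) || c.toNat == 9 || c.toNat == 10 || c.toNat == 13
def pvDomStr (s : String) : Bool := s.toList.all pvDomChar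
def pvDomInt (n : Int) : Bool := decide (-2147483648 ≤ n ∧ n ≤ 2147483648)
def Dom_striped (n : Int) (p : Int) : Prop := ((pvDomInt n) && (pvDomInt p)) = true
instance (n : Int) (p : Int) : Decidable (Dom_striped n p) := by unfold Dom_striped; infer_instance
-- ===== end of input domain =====

-- B builds each processor's bucket directly as the stride slice range(j, n, p) instead of
-- A's single interleaved pass with a rotating modulo counter (objective: simpler).

-- ===== PORT A =====
-- one loop step of A: append i to bucket `proc`, add i+1 to its work, rotate proc
def stripedStepA (p : Int) (st : List (List Int) × List Int × Int) (i : Int) :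
    List (List Int) × List Int × Int :=
  let ind := st.1; let tw := st.2.1; let proc := st.2.2
  (PySem.List.pySetD ind proc (PySem.List.pyGetD ind proc [] ++ [i]),
   PySem.List.pySetD tw proc (PySem.List.pyGetD tw proc 0 + (i + 1)),
   PySem.Int.mod (proc + 1) p)

def striped (n : Int) (p : Int) : List (List Int) × List Int :=
  let indices := (PySem.List.pyRange 0 p 1).map (fun _ => ([] : List Int))
  let total_work := (PySem.List.pyRange 0 p 1).map (fun _ => (0 : Int))
  let st := (PySem.List.pyRange 0 n 1).foldl (stripedStepA p) (indices, total_work, 0)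
  (st.1, st.2.1)

-- ===== PORT B =====
def striped_alt (n : Int) (p : Int) : List (List Int) × List Int :=
  let indices := (PySem.List.pyRange 0 p 1).map (fun j => PySem.List.pyRange j n p)
  let total_work := indices.map (fun chunk => (chunk.map (fun i => i + 1)).sum)
  (indices, total_work)

-- ===== PRECONDITION & SPEC =====
-- Pre_ excludes exactly the inputs where A raises: n > 0 with p ≤ 0 (IndexError on indices[0]).
def Pre_striped (n : Int) (p : Int) : Prop := 1 ≤ p ∨ n ≤ 0
instance (n : Int) (p : Int) : Decidable (Pre_striped n p) := by unfold Pre_striped; infer_instance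
def pvWitness_striped : Int × Int := (7, 3)

def Spec_striped (n : Int) (p : Int) (out : List (List Int) × List Int) : Prop := out = striped_alt n p
instance (n : Int) (p : Int) (out : List (List Int) × List Int) : Decidable (Spec_striped n p out) := by unfold Spec_striped; infer_instance

-- ===== CLAIM (what is proved, stated in full; the proofs are below) =====
def Claim_equal_striped : Prop := ∀ (n : Int) (p : Int), Dom_striped n p → Pre_striped n p → Spec_striped n p (striped n p)

-- ===== LEMMAS AND PROOFS =====

-- (p*q + t) / p = q for 0 ≤ t < p
lemma ediv_stride (p q t : Int) (ht0 : 0 ≤ t) (htp : t < p) : (p * q + t) / p = q := by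
  have hp : p ≠ 0 := by omega
  rw [show p * q + t = t + p * q by ring, Int.add_mul_ediv_left t q hp,
      Int.ediv_eq_zero_of_lt ht0 htp, zero_add]

-- an empty stride slice
lemma stride_nil (j b p : Int) (hp : 0 < p) (h : b ≤ j) : PySem.List.pyRange j b p = [] := by
  rw [PySem.List.pyRange_of_pos _ _ hp, if_neg (by omega)]
  simp

-- extending the upper bound of a stride slice by one picks up k exactly in bucket k % p
lemma stride_succ (j k p : Int) (hp : 0 < p) (hj0 : 0 ≤ j) (hjp : j < p) (hk : 0 ≤ k) :
    PySem.List.pyRange j (k + 1) p =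
      PySem.List.pyRange j k p ++ (if PySem.Int.mod k p = j then [k] else []) := by
  rw [PySem.List.pyRange_of_pos _ _ hp, PySem.List.pyRange_of_pos _ _ hp,
      PySem.Int.mod_eq_emod_of_pos hp]
  have hdm : p * (k / p) + k % p = k := (Int.mul_ediv_add_emod k p)
  have hr0 : 0 ≤ k % p := Int.emod_nonneg k (by omega)
  have hrp : k % p < p := Int.emod_lt_of_pos k hp
  have hq0 : 0 ≤ k / p := Int.ediv_nonneg hk (by omega)
  have hpq1 : p * (k / p + 1) = p * (k / p) + p := by ring
  have hpq0 : 0 ≤ p * (k / p) := mul_nonneg (by omega) hq0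
  set q := k / p with hqdef
  set r := k % p with hrdef
  by_cases hrj : r = j
  · -- k belongs to bucket j : count goes from q to q + 1, new element is k
    have hc1 : (k + 1 - j + p - 1) / p = q + 1 := by
      rw [show k + 1 - j + p - 1 = p * (q + 1) + 0 by omega]
      exact ediv_stride p (q + 1) 0 le_rfl hp
    have hjk1 : j < k + 1 := by omega
    rw [if_pos hjk1, if_pos hrj, hc1]
    by_cases hjk : j < k
    · have hc0 : (k - j + p - 1) / p = q := by
        rw [show k - j + p - 1 = p * q + (p - 1) by omega]
        exact ediv_stride p q (p - 1) (by omega) (by omega)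
      rw [if_pos hjk, hc0]
      have hqn : ((q + 1).toNat) = q.toNat + 1 := by omega
      rw [hqn, List.range_succ, List.map_append]
      simp only [List.map_cons, List.map_nil]
      congr 2
      rw [show ((q.toNat : Nat) : Int) = q from by omega]
      omega
    · -- j = k, q = 0
      have hjeq : j = k := by omega
      have hq : q = 0 := by rw [hqdef]; exact Int.ediv_eq_zero_of_lt hk (by omega)
      rw [if_neg hjk, hq]
      simp [hjeq]
  · rw [if_neg hrj]
    by_cases hjk1 : j < k + 1
    · rw [if_pos hjk1]
      by_cases hjk : j < k
      · rw [if_pos hjk, List.append_nil]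
        congr 2
        by_cases hlt : j < r
        · have h1 : (k - j + p - 1) / p = q + 1 := by
            rw [show k - j + p - 1 = p * (q + 1) + (r - j - 1) by omega]
            exact ediv_stride p (q + 1) (r - j - 1) (by omega) (by omega)
          have h2 : (k + 1 - j + p - 1) / p = q + 1 := by
            rw [show k + 1 - j + p - 1 = p * (q + 1) + (r - j) by omega]
            exact ediv_stride p (q + 1) (r - j) (by omega) (by omega)
          rw [h1, h2]
        · have hgt : r < j := by omega
          have h1 : (k - j + p - 1) / p = q := by
            rw [show k - j + p - 1 = p * q + (r - j + p - 1) by omega]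
            exact ediv_stride p q (r - j + p - 1) (by omega) (by omega)
          have h2 : (k + 1 - j + p - 1) / p = q := by
            rw [show k + 1 - j + p - 1 = p * q + (r - j + p) by omega]
            exact ediv_stride p q (r - j + p) (by omega) (by omega)
          rw [h1, h2]
      · exfalso
        have hjek : j = k := by omega
        have hq : q = 0 := by rw [hqdef]; exact Int.ediv_eq_zero_of_lt hk (by omega)
        rw [hq, mul_zero, zero_add] at hdm
        omega
    · rw [if_neg hjk1, if_neg (by omega : ¬ j < k), List.append_nil]

-- setting index m of a map over range 0..P to a new value is a map with f updated at m
lemma pySetD_map_pyRange {β : Type} (f : Int → β) (P m : Int) (v : β)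
    (h0 : 0 ≤ m) (hm : m < P) :
    PySem.List.pySetD ((PySem.List.pyRange 0 P 1).map f) m v =
      (PySem.List.pyRange 0 P 1).map (fun j => if j = m then v else f j) := by
  have hlen : ((PySem.List.pyRange 0 P 1).map f).length = (P - 0).toNat := by
    simp [PySem.List.length_pyRange_one]
  unfold PySem.List.pySetD PySem.List.pySet? PySem.List.pyIdx?
  rw [hlen, if_pos h0, if_pos (by omega : m < ((P - 0).toNat : Int))]
  simp only [Option.map_some, Option.getD_some]
  apply List.ext_getElem
  · simp [PySem.List.length_pyRange_one]
  · intro i h1 h2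
    have hi : i < (P - 0).toNat := by
      simpa [PySem.List.length_pyRange_one] using h2
    rw [List.getElem_set]
    by_cases him : m.toNat = i
    · rw [if_pos him]
      have hv : (PySem.List.pyRange 0 P 1)[i]'(by rw [PySem.List.length_pyRange_one]; exact hi) = (0 : Int) + i :=
        PySem.List.getElem_pyRange_one 0 P i (by rw [PySem.List.length_pyRange_one]; exact hi)
      rw [List.getElem_map, hv, if_pos (by omega)]
    · rw [if_neg him, List.getElem_map, List.getElem_map]
      have hv : (PySem.List.pyRange 0 P 1)[i]'(by rw [PySem.List.length_pyRange_one]; exact hi) = (0 : Int) + i :=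
        PySem.List.getElem_pyRange_one 0 P i (by rw [PySem.List.length_pyRange_one]; exact hi)
      rw [hv, if_neg (by omega)]

-- the loop invariant of A, after k iterations
lemma loopA (p : Int) (hp : 1 ≤ p) (k : Nat) :
    (PySem.List.pyRange 0 (k : Int) 1).foldl (stripedStepA p)
      ((PySem.List.pyRange 0 p 1).map (fun _ => ([] : List Int)),
       (PySem.List.pyRange 0 p 1).map (fun _ => (0 : Int)), 0) =
    ((PySem.List.pyRange 0 p 1).map (fun j => PySem.List.pyRange j (k : Int) p),
     (PySem.List.pyRange 0 p 1).map
       (fun j => ((PySem.List.pyRange j (k : Int) p).map (fun i => i + 1)).sum),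
     PySem.Int.mod (k : Int) p) := by
  have hp' : (0 : Int) < p := by omega
  induction k with
  | zero =>
    rw [show (((0:Nat)) : Int) = 0 from rfl, PySem.List.pyRange_one_eq_nil le_rfl]
    simp only [List.foldl_nil]
    refine Prod.ext ?_ (Prod.ext ?_ ?_)
    · exact (List.map_congr_left (fun j hj => by
        have := (PySem.List.mem_pyRange_one).mp hj
        rw [stride_nil j 0 p hp' (by omega)])).symm
    · exact (List.map_congr_left (fun j hj => by
        have := (PySem.List.mem_pyRange_one).mp hj
        rw [stride_nil j 0 p hp' (by omega)]; rfl)).symm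
    · rw [PySem.Int.mod_eq_emod_of_pos hp']
      exact Int.zero_emod p
  | succ k ih =>
    rw [show ((k + 1 : Nat) : Int) = (k : Int) + 1 by push_cast; ring,
        PySem.List.pyRange_one_succ_right (by omega : (0:Int) ≤ (k:Int)),
        List.foldl_append, ih]
    simp only [List.foldl_cons, List.foldl_nil]
    have hm0 : 0 ≤ PySem.Int.mod (k : Int) p := PySem.Int.mod_nonneg _ hp'
    have hmp : PySem.Int.mod (k : Int) p < p := PySem.Int.mod_lt _ hp'
    set m := PySem.Int.mod (k : Int) p with hmdef
    unfold stripedStepA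
    simp only
    have hget1 : PySem.List.pyGetD ((PySem.List.pyRange 0 p 1).map (fun j => PySem.List.pyRange j (k : Int) p)) m [] = PySem.List.pyRange m (k : Int) p :=
      PySem.List.pyGetD_map_pyRange_of_nonneg _ p m _ hm0 hmp
    have hget2 : PySem.List.pyGetD ((PySem.List.pyRange 0 p 1).map (fun j => ((PySem.List.pyRange j (k : Int) p).map (fun i => i + 1)).sum)) m 0 = ((PySem.List.pyRange m (k : Int) p).map (fun i => i + 1)).sum :=
      PySem.List.pyGetD_map_pyRange_of_nonneg _ p m _ hm0 hmp
    rw [hget1, hget2, pySetD_map_pyRange _ p m _ hm0 hmp, pySetD_map_pyRange _ p m _ hm0 hmp]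
    refine Prod.ext ?_ (Prod.ext ?_ ?_)
    · simp only
      apply List.map_congr_left
      intro j hj
      have hjb := (PySem.List.mem_pyRange_one).mp hj
      rw [stride_succ j (k : Int) p hp' (by omega) (by omega) (by positivity)]
      by_cases hjm : j = m
      · rw [if_pos hjm, if_pos (by omega : m = j), hjm]
      · rw [if_neg hjm, if_neg (by omega : ¬ m = j), List.append_nil]
    · simp only
      apply List.map_congr_left
      intro j hj
      have hjb := (PySem.List.mem_pyRange_one).mp hj
      rw [stride_succ j (k : Int) p hp' (by omega) (by omega) (by positivity)]
      by_cases hjm : j = m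
      · rw [if_pos hjm, if_pos (by omega : m = j), hjm]
        simp [List.sum_append]
      · rw [if_neg hjm, if_neg (by omega : ¬ m = j), List.append_nil]
    · simp only
      rw [hmdef, PySem.Int.mod_eq_emod_of_pos hp', PySem.Int.mod_eq_emod_of_pos hp',
          PySem.Int.mod_eq_emod_of_pos hp']
      conv_lhs => rw [Int.add_emod]
      conv_rhs => rw [Int.add_emod]
      rw [Int.emod_emod_of_dvd _ dvd_rfl]

-- ===== VERDICT (by name: the statement is the Claim_ definition above) =====
theorem striped_spec : Claim_equal_striped := by
  intro n p _ hpre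
  unfold Spec_striped striped striped_alt
  simp only
  by_cases hn : n ≤ 0
  · rw [PySem.List.pyRange_one_eq_nil (by omega : n ≤ 0)]
    simp only [List.foldl_nil]
    by_cases hp : 1 ≤ p
    · refine Prod.ext ?_ ?_
      · exact (List.map_congr_left (fun j hj => by
          have := (PySem.List.mem_pyRange_one).mp hj
          rw [stride_nil j n p (by omega) (by omega)])).symm
      · simp only [List.map_map]
        exact (List.map_congr_left (fun j hj => by
          have := (PySem.List.mem_pyRange_one).mp hj
          simp only [Function.comp_apply]
          rw [stride_nil j n p (by omega) (by omega)]
          rfl)).symm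
    · rw [PySem.List.pyRange_one_eq_nil (by omega : p ≤ 0)]
      simp
  · have hp : 1 ≤ p := by cases hpre with
      | inl h => exact h
      | inr h => omega
    have hn' : ((n.toNat : Nat) : Int) = n := by omega
    rw [← hn', loopA p hp n.toNat]
    refine Prod.ext rfl ?_
    simp [List.map_map, Function.comp]
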